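-- pv_equiv track=rewrite | github.com/otugayev/tensorrag | tensorrag/answering.py | _is_single_edit_or_transposition
-- ===== SOURCE A (Python) =====
-- def _is_single_edit_or_transposition(left: str, right: str) -> bool:
--     if left == right:
--         return True
--     if abs(len(left) - len(right)) > 1:
--         return False
--
--     if len(left) == len(right):
--         mismatches = [idx for idx, (a, b) in enumerate(zip(left, right)) if a != b]
--         if len(mismatches) == 1:
--             return True
--         if len(mismatches) == 2:
--             i, j = mismatches
--             return j == i + 1 and left[i] == right[j] and left[j] == right[i]
--         return False
--
--     if len(left) > len(right):
--         left, right = right, left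
--
--     i = j = edits = 0
--     while i < len(left) and j < len(right):
--         if left[i] == right[j]:
--             i += 1
--             j += 1
--             continue
--         edits += 1
--         if edits > 1:
--             return False
--         j += 1
--     return True
-- ===== SOURCE B (Python) =====
-- def _is_single_edit_or_transposition(left: str, right: str) -> bool:
--     # Strip the longest common prefix, then decide with one edit budget
--     # spent at the first differing position.
--     i = 0
--     n, m = len(left), len(right)
--     while i < n and i < m and left[i] == right[i]:
--         i += 1
--     l, r = left[i:], right[i:]
--     if not l or not r:
--         return abs(n - m) <= 1
--     # l and r are nonempty and l[0] != r[0]: exactly one edit must fix it.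
--     return (l[1:] == r[1:]                       # substitution
--             or l == r[1:]                        # deletion from right
--             or l[1:] == r                        # insertion into right
--             or (len(l) >= 2 and len(r) >= 2
--                 and l[0] == r[1] and l[1] == r[0] and l[2:] == r[2:]))  # adjacent transposition
-- ===== Notes on version B (the rewrite author's own statement) =====
-- stated objective: simpler
-- what changed: A's three-way case split (a mismatch-index list for equal lengths, a greedy two-pointer skip scan for length-diff-1) is replaced by one common-prefix strip followed by a single boolean over the remainders (substitution / insertion / deletion / adjacent transposition as four slice equalities).
import Mathlib
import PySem

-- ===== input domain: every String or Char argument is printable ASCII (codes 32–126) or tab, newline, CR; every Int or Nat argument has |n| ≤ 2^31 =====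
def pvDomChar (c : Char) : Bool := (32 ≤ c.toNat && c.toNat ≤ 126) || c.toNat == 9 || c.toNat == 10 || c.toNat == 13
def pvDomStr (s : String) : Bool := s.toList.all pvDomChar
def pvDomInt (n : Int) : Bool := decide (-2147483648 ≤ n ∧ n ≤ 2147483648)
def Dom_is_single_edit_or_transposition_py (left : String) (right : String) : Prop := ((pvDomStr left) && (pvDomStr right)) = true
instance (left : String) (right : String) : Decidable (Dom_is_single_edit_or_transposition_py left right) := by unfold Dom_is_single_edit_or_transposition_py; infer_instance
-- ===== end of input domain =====

-- B replaces A's three-way case split (mismatch-index list for equal lengths, greedy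
-- two-pointer scan otherwise) by a single common-prefix strip followed by one boolean
-- over the remainders; objective: simpler, same O(n) cost.

-- ===== PORT A =====
-- mismatches = [idx for idx, (a, b) in enumerate(zip(left, right)) if a != b]
def pyMismatches (zs : List (Char × Char)) (s : Int) : List Int :=
  (PySem.List.enumerate zs s).filterMap (fun p => if p.2.1 ≠ p.2.2 then some p.1 else none)

-- the while loop: i/j pointer advance becomes structural consumption of the two lists
def pyScan : List Char → List Char → Nat → Bool
  | a :: l, b :: r, edits =>
    if a = b then pyScan l r edits
    else if edits + 1 > 1 then false
    else pyScan (a :: l) r (edits + 1)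
  | _, _, _ => true

def pyCoreA (L R : List Char) : Bool :=
  if L = R then true
  else if ((L.length : Int) - (R.length : Int)).natAbs > 1 then false
  else if L.length = R.length then
    match pyMismatches (L.zip R) 0 with
    | [_] => true
    | [i, j] => decide (j = i + 1) && (PySem.List.pyGet? L i == PySem.List.pyGet? R j)
                  && (PySem.List.pyGet? L j == PySem.List.pyGet? R i)
    | _ => false
  else if L.length > R.length then pyScan R L 0 else pyScan L R 0

def is_single_edit_or_transposition_py (left : String) (right : String) : Bool :=
  pyCoreA left.toList right.toList

-- ===== PORT B =====
-- the while loop stripping the common prefix, then the single boolean over remainders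
def edit1 : List Char → List Char → Bool
  | a :: l, b :: r =>
    if a = b then edit1 l r
    else decide (l = r) || decide (a :: l = r) || decide (l = b :: r) ||
      (match l, r with
       | x :: l', y :: r' => decide (a = y) && decide (b = x) && decide (l' = r')
       | _, _ => false)
  | l, r => decide (((l.length : Int) - (r.length : Int)).natAbs ≤ 1)

def is_single_edit_or_transposition_py_alt (left : String) (right : String) : Bool :=
  edit1 left.toList right.toList

-- ===== PRECONDITION & SPEC =====
def Spec_is_single_edit_or_transposition_py (left : String) (right : String) (out : Bool) : Prop := out = is_single_edit_or_transposition_py_alt left right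
instance (left : String) (right : String) (out : Bool) : Decidable (Spec_is_single_edit_or_transposition_py left right out) := by unfold Spec_is_single_edit_or_transposition_py; infer_instance

-- ===== CLAIM (what is proved, stated in full; the proofs are below) =====
def Claim_equal_is_single_edit_or_transposition_py : Prop := ∀ (left : String) (right : String), Dom_is_single_edit_or_transposition_py left right → Spec_is_single_edit_or_transposition_py left right (is_single_edit_or_transposition_py left right)

-- ===== LEMMAS AND PROOFS =====

theorem pyMismatches_nil (s : Int) : pyMismatches [] s = [] := rfl

theorem pyMismatches_cons (x y : Char) (zs : List (Char × Char)) (s : Int) :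
    pyMismatches ((x, y) :: zs) s =
      if x = y then pyMismatches zs (s + 1) else s :: pyMismatches zs (s + 1) := by
  simp only [pyMismatches, PySem.List.enumerate_cons, List.filterMap_cons]
  by_cases h : x = y <;> simp [h]

theorem pyMismatches_shift (zs : List (Char × Char)) (s : Int) :
    pyMismatches zs (s + 1) = (pyMismatches zs s).map (· + 1) := by
  induction zs generalizing s with
  | nil => rfl
  | cons p zs ih =>
    obtain ⟨x, y⟩ := p
    rw [pyMismatches_cons, pyMismatches_cons]
    split_ifs with h <;> simp [ih]

theorem pyMismatches_ge (zs : List (Char × Char)) (s i : Int)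
    (h : i ∈ pyMismatches zs s) : s ≤ i := by
  induction zs generalizing s with
  | nil => simp [pyMismatches_nil] at h
  | cons p zs ih =>
    obtain ⟨x, y⟩ := p
    rw [pyMismatches_cons] at h
    split_ifs at h with hxy
    · have := ih (s + 1) h; omega
    · rcases List.mem_cons.mp h with h | h
      · omega
      · have := ih (s + 1) h; omega

theorem pyMismatches_nil_iff (L R : List Char) (h : L.length = R.length) :
    pyMismatches (L.zip R) 0 = [] ↔ L = R := by
  induction L generalizing R with
  | nil => cases R with
    | nil => simp [pyMismatches_nil]
    | cons b r => simp at h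
  | cons a l ih =>
    cases R with
    | nil => simp at h
    | cons b r =>
      simp only [List.zip_cons_cons, pyMismatches_cons]
      rw [pyMismatches_shift]
      split_ifs with hab
      · subst hab
        simp only [List.map_eq_nil_iff]
        rw [ih r (by simpa using h)]
        simp
      · simp [hab]

theorem pyScan_one (X Y : List Char) (h : X.length = Y.length) :
    pyScan X Y 1 = decide (X = Y) := by
  induction X generalizing Y with
  | nil =>
    cases Y with
    | nil => simp [pyScan]
    | cons b r => simp at h
  | cons a l ih =>
    cases Y with
    | nil => simp at h
    | cons b r =>
      rw [pyScan]
      by_cases hab : a = b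
      · subst hab
        rw [if_pos rfl, ih r (by simpa using h)]
        simp
      · simp [hab]

theorem pyGet?_succ_of_mem (L : List Char) (c : Char) (i : Int) (h : 0 ≤ i) :
    PySem.List.pyGet? (c :: L) (i + 1) = PySem.List.pyGet? L i := by
  obtain ⟨n, rfl⟩ := Int.eq_ofNat_of_zero_le h
  rw [PySem.List.pyGet?_cons_succ]

-- the equal-heads step for A's port
theorem stepA (c : Char) (L R : List Char) :
    pyCoreA (c :: L) (c :: R) = pyCoreA L R := by
  unfold pyCoreA
  by_cases hLR : L = R
  · subst hLR; simp
  · rw [if_neg (by simpa using hLR), if_neg hLR]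
    by_cases hd : (((L.length : Int)) - ((R.length : Int))).natAbs > 1
    · rw [if_pos (by simp only [List.length_cons, Nat.cast_add, Nat.cast_one]; omega),
          if_pos hd]
    · rw [if_neg (by simp only [List.length_cons, Nat.cast_add, Nat.cast_one]; omega),
          if_neg hd]
      by_cases hlen : L.length = R.length
      · rw [if_pos (by simp [hlen]), if_pos hlen]
        have hmm : pyMismatches ((c :: L).zip (c :: R)) 0 =
            (pyMismatches (L.zip R) 0).map (· + 1) := by
          rw [List.zip_cons_cons, pyMismatches_cons, if_pos rfl, pyMismatches_shift]
        rw [hmm]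
        rcases h0 : pyMismatches (L.zip R) 0 with _ | ⟨i, _ | ⟨j, _ | ⟨k, rest⟩⟩⟩
        · simp
        · simp
        · have hi : 0 ≤ i := pyMismatches_ge _ _ _ (by rw [h0]; simp)
          have hj : 0 ≤ j := pyMismatches_ge _ _ _ (by rw [h0]; simp)
          simp only [List.map_cons, List.map_nil]
          rw [pyGet?_succ_of_mem _ _ _ hi, pyGet?_succ_of_mem _ _ _ hj,
              pyGet?_succ_of_mem _ _ _ hi, pyGet?_succ_of_mem _ _ _ hj,
              show (decide (j + 1 = i + 1 + 1)) = (decide (j = i + 1)) from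
                decide_eq_decide.mpr (by omega)]
        · simp
      · rw [if_neg (by simp [hlen]), if_neg hlen]
        by_cases hgt : L.length > R.length
        · rw [if_pos (by simpa using hgt), if_pos hgt]
          simp [pyScan]
        · rw [if_neg (by simpa using hgt), if_neg hgt]
          simp [pyScan]

theorem core_eq (L R : List Char) :
    pyCoreA L R = edit1 L R := by
  induction L generalizing R with
  | nil =>
    cases R with
    | nil => simp [pyCoreA, edit1]
    | cons b r =>
      cases r with
      | nil => simp [pyCoreA, edit1, pyScan]
      | cons b' r' =>
        rw [pyCoreA, if_neg (by simp), if_pos (by simp; omega)]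
        simp [edit1]; omega
  | cons a l ih =>
    cases R with
    | nil =>
      cases l with
      | nil => simp [pyCoreA, edit1, pyScan]
      | cons a' l' =>
        rw [pyCoreA, if_neg (by simp), if_pos (by simp; omega)]
        simp [edit1]; omega
    | cons b r =>
      by_cases hab : a = b
      · subst hab
        rw [stepA, ih r]
        simp [edit1]
      · rw [pyCoreA, if_neg (by simp [hab])]
        by_cases hd : (((a :: l).length : Int) - ((b :: r).length : Int)).natAbs > 1
        · rw [if_pos hd]
          have h1 : l ≠ r := fun e => by
            subst e; simp only [List.length_cons] at hd; omega
          have h2 : a :: l ≠ r := fun e => by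
            rw [← e] at hd; simp only [List.length_cons] at hd; omega
          have h3 : l ≠ b :: r := fun e => by
            rw [e] at hd; simp only [List.length_cons] at hd; omega
          symm
          simp only [edit1, if_neg hab]
          simp only [h1, h2, h3]
          rcases l with _ | ⟨x, l'⟩
          · simp
          · rcases r with _ | ⟨y, r'⟩
            · simp
            · have h4 : l' ≠ r' := fun e => by
                rw [e] at hd; simp only [List.length_cons] at hd; omega
              simp [h4]
        · rw [if_neg hd]
          by_cases hlen : (a :: l).length = (b :: r).length
          · rw [if_pos hlen]
            have hlr : l.length = r.length := by simpa using hlen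
            have hzip : pyMismatches ((a :: l).zip (b :: r)) 0 =
                0 :: (pyMismatches (l.zip r) 0).map (· + 1) := by
              rw [List.zip_cons_cons, pyMismatches_cons, if_neg hab, pyMismatches_shift]
            rw [hzip]
            rcases h0 : pyMismatches (l.zip r) 0 with _ | ⟨j, _ | ⟨k, rest⟩⟩
            · -- no further mismatch: l = r, substitution of a by b
              obtain rfl : l = r := (pyMismatches_nil_iff l r hlr).mp h0
              simp [edit1, hab]
            · -- exactly one further mismatch, at index j
              rcases l with _ | ⟨x, l'⟩
              · rcases r with _ | ⟨y, r'⟩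
                · simp [pyMismatches] at h0
                · simp at hlr
              · rcases r with _ | ⟨y, r'⟩
                · simp at hlr
                · have hlr' : l'.length = r'.length := by simpa using hlr
                  have h2 : a :: x :: l' ≠ y :: r' := fun e => by
                    have := congrArg List.length e; simp at this; omega
                  have h3 : x :: l' ≠ b :: y :: r' := fun e => by
                    have := congrArg List.length e; simp at this; omega
                  by_cases hxy : x = y
                  · subst hxy
                    have hmm1 : pyMismatches ((x :: l').zip (x :: r')) 0 =
                        (pyMismatches (l'.zip r') 0).map (· + 1) := by
                      rw [List.zip_cons_cons, pyMismatches_cons, if_pos rfl,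
                          pyMismatches_shift]
                    rw [hmm1] at h0
                    rcases h1 : pyMismatches (l'.zip r') 0 with _ | ⟨i, t⟩
                    · rw [h1] at h0; simp at h0
                    · rw [h1] at h0
                      have hi : 0 ≤ i := pyMismatches_ge _ _ _ (by rw [h1]; simp)
                      rcases t with _ | _
                      · -- j = i + 1 ≥ 1: A's adjacency test fails, B finds no edit
                        simp only [List.map_cons, List.map_nil] at h0
                        obtain ⟨rfl, -⟩ : i + 1 = j ∧ True := by simpa using h0
                        have h4 : l' ≠ r' := fun e => by
                          rw [(pyMismatches_nil_iff _ _ hlr').mpr e] at h1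
                          simp at h1
                        have hne : x :: l' ≠ x :: r' := by simp [h4]
                        symm
                        simp only [edit1, if_neg hab]
                        simp [hne, h2, h3, h4]
                        intro h _
                        exact absurd h (by omega)
                      · simp at h0
                  · have hmm1 : pyMismatches ((x :: l').zip (y :: r')) 0 =
                        0 :: (pyMismatches (l'.zip r') 0).map (· + 1) := by
                      rw [List.zip_cons_cons, pyMismatches_cons, if_neg hxy,
                          pyMismatches_shift]
                    rw [hmm1] at h0
                    obtain ⟨rfl, hnil⟩ :
                        0 = j ∧ (pyMismatches (l'.zip r') 0).map (· + 1) = [] := by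
                      simpa using h0
                    obtain rfl : l' = r' :=
                      (pyMismatches_nil_iff _ _ hlr').mp (by simpa using hnil)
                    have hg1 : PySem.List.pyGet? (a :: x :: l') (0 + 1) = some x := by
                      rw [pyGet?_succ_of_mem _ _ _ le_rfl]
                      exact PySem.List.pyGet?_zero_cons _ _
                    have hg2 : PySem.List.pyGet? (b :: y :: l') (0 + 1) = some y := by
                      rw [pyGet?_succ_of_mem _ _ _ le_rfl]
                      exact PySem.List.pyGet?_zero_cons _ _
                    have hne : x :: l' ≠ y :: l' := by simp [hxy]
                    symm
                    simp only [edit1, if_neg hab]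
                    simp only [List.map_cons, List.map_nil, hg1, hg2, hne, h2, h3,
                      PySem.List.pyGet?_zero_cons]
                    by_cases hay : a = y
                    · by_cases hbx : b = x
                      · simp [hay, hbx]
                      · have hxb : ¬ x = b := fun e => hbx e.symm
                        simp [hay, hbx, hxb]
                    · simp [hay]
            · -- at least two further mismatches: more than two in total
              have hne : l ≠ r := fun e => by
                rw [(pyMismatches_nil_iff _ _ hlr).mpr e] at h0; simp at h0
              rcases l with _ | ⟨x, l'⟩
              · rcases r with _ | ⟨y, r'⟩
                · simp [pyMismatches] at h0
                · simp at hlr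
              · rcases r with _ | ⟨y, r'⟩
                · simp at hlr
                · have hlr' : l'.length = r'.length := by simpa using hlr
                  have h2 : a :: x :: l' ≠ y :: r' := fun e => by
                    have := congrArg List.length e; simp at this; omega
                  have h3 : x :: l' ≠ b :: y :: r' := fun e => by
                    have := congrArg List.length e; simp at this; omega
                  have h4 : l' ≠ r' := fun e => by
                    subst e
                    have : pyMismatches ((x :: l').zip (y :: l')) 0 =
                        if x = y then [] else [0] := by
                      rw [List.zip_cons_cons, pyMismatches_cons, pyMismatches_shift,
                          (pyMismatches_nil_iff l' l' rfl).mpr rfl]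
                      split_ifs
                      all_goals simp
                    rw [this] at h0
                    split_ifs at h0
                    all_goals simp at h0
                  symm
                  simp only [edit1, if_neg hab]
                  simp [hne, h2, h3, h4]
          · rw [if_neg hlen]
            by_cases hgt : (a :: l).length > (b :: r).length
            · rw [if_pos hgt]
              have hlr : l.length = r.length + 1 := by
                simp only [List.length_cons] at hd hlen hgt ⊢; omega
              have hba : ¬ b = a := fun e => hab e.symm
              have hscan : pyScan (b :: r) (a :: l) 0 = decide (b :: r = l) := by
                rw [pyScan, if_neg hba]
                norm_num
                exact pyScan_one _ _ (by simp [hlr])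
              rw [hscan]
              have h1 : l ≠ r := fun e => by rw [e] at hlr; omega
              have h2 : a :: l ≠ r := fun e => by
                have := congrArg List.length e; simp at this; omega
              symm
              simp only [edit1, if_neg hab]
              simp only [h1, h2]
              rcases l with _ | ⟨x, l'⟩
              · simp at hlr
              · rcases r with _ | ⟨y, r'⟩
                · rw [show (decide ((x :: l' : List Char) = [b])) =
                        (decide (([b] : List Char) = x :: l')) from
                      decide_eq_decide.mpr eq_comm]
                  simp
                · have h4 : l' ≠ r' := fun e => by
                    have := congrArg List.length e
                    simp only [List.length_cons] at hlr
                    simp at this; omega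
                  rw [show (decide ((x :: l' : List Char) = b :: y :: r')) =
                        (decide ((b :: y :: r' : List Char) = x :: l')) from
                      decide_eq_decide.mpr eq_comm]
                  simp [h4]
            · rw [if_neg hgt]
              have hlr : r.length = l.length + 1 := by
                simp only [List.length_cons] at hd hlen hgt ⊢; omega
              have hscan : pyScan (a :: l) (b :: r) 0 = decide (a :: l = r) := by
                rw [pyScan, if_neg hab]
                norm_num
                exact pyScan_one _ _ (by simp [hlr])
              rw [hscan]
              have h1 : l ≠ r := fun e => by rw [e] at hlr; omega
              have h3 : l ≠ b :: r := fun e => by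
                have := congrArg List.length e; simp at this; omega
              symm
              simp only [edit1, if_neg hab]
              simp only [h1, h3]
              rcases l with _ | ⟨x, l'⟩
              · rcases r with _ | ⟨y, r'⟩
                all_goals simp
              · rcases r with _ | ⟨y, r'⟩
                · simp
                · have h4 : l' ≠ r' := fun e => by
                    have := congrArg List.length e
                    simp only [List.length_cons] at hlr
                    simp at this; omega
                  simp [h4]

-- ===== VERDICT (by name: the statement is the Claim_ definition above) =====
theorem is_single_edit_or_transposition_py_spec : Claim_equal_is_single_edit_or_transposition_py := by
  intro left right _
  unfold Spec_is_single_edit_or_transposition_py is_single_edit_or_transposition_py_alt is_single_edit_or_transposition_py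
  exact core_eq left.toList right.toList
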